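-- pv_equiv track=rewrite | github.com/nolan-3/Sign-In | getFreePeriod.py | daysOff
-- ===== SOURCE A (Python) =====
-- def daysOff(year, month, day):
--     happyDays = 0
--     # format [year,month,day]
--     daysOff = [[2022, 9, 26], [2022, 10, 5], [2022, 10, 21], [2022, 11, 14], [2022, 11, 23], [2022, 11, 24],
--                [2022, 11, 25], [2022, 12, 19], [2022, 12, 20], [
--                    2022, 12, 21], [2022, 12, 22], [2022, 12, 23],
--                [2022, 12, 26], [2022, 12, 27], [2022, 12, 28], [
--         2022, 12, 29], [2022, 12, 30],
--         [2023, 1, 2], [2023, 1, 16], [2023, 2, 17], [2023, 2, 20], [2023, 3, 17],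
--         [2023, 3, 24], [2023, 3, 27], [2023, 3, 28], [
--             2023, 3, 29], [2023, 3, 30],
--         [2023, 3, 31], [2023, 4, 7], [2023, 5, 1], [2023, 5, 29]]
--
--     # Find how many days off we've had so far, yes it is chronological but lets not rely on that
--     for i in range(0, len(daysOff)):
--         if year > daysOff[i][0]:
--             happyDays += 1
--         elif year == daysOff[i][0]:
--             if month > daysOff[i][1]:
--                 happyDays += 1
--             elif month == daysOff[i][1]:
--                 if day > daysOff[i][2]:
--                     happyDays += 1
--     return happyDays
-- ===== SOURCE B (Python) =====
-- # The hardcoded day-off table, kept in strictly increasing chronological order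
-- # (year, month, day).
-- _DATES = [(2022, 9, 26), (2022, 10, 5), (2022, 10, 21), (2022, 11, 14), (2022, 11, 23),
--           (2022, 11, 24), (2022, 11, 25), (2022, 12, 19), (2022, 12, 20), (2022, 12, 21),
--           (2022, 12, 22), (2022, 12, 23), (2022, 12, 26), (2022, 12, 27), (2022, 12, 28),
--           (2022, 12, 29), (2022, 12, 30), (2023, 1, 2), (2023, 1, 16), (2023, 2, 17),
--           (2023, 2, 20), (2023, 3, 17), (2023, 3, 24), (2023, 3, 27), (2023, 3, 28),
--           (2023, 3, 29), (2023, 3, 30), (2023, 3, 31), (2023, 4, 7), (2023, 5, 1),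
--           (2023, 5, 29)]
--
--
-- def _before(entry, year, month, day):
--     """True iff entry is strictly earlier than (year, month, day)."""
--     ey, em, ed = entry
--     if ey != year:
--         return ey < year
--     if em != month:
--         return em < month
--     return ed < day
--
--
-- def daysOff(year, month, day):
--     # Binary search (bisect_left by hand): the table is sorted, so the count of
--     # entries strictly before the given date is the left insertion point.
--     lo, hi = 0, len(_DATES)
--     while lo < hi:
--         mid = (lo + hi) // 2
--         if _before(_DATES[mid], year, month, day):
--             lo = mid + 1
--         else:
--             hi = mid
--     return lo
-- ===== Notes on version B (the rewrite author's own statement) =====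
-- stated objective: alternative
-- what changed: Replaces A's linear scan with per-entry nested year/month/day comparisons by a hand-written bisect_left binary search over the chronologically sorted hardcoded date table, using a lexicographic _before helper.
import Mathlib
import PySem

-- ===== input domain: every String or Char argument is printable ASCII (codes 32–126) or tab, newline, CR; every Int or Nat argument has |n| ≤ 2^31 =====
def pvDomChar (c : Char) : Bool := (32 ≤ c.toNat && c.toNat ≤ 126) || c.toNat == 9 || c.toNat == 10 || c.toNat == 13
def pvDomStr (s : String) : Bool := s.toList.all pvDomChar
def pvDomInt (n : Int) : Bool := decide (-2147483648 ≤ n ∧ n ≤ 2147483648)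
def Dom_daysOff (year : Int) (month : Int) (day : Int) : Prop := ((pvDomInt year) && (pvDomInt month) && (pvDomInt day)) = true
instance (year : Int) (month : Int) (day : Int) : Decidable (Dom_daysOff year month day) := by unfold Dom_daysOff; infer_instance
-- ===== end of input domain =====

-- B replaces A's linear scan with nested comparisons by a hand-written binary search
-- (bisect_left) over the chronologically sorted hardcoded table (objective: alternative).

-- ===== PORT A =====
-- the literal local list daysOff of A ([[year, month, day], …])
def daysOffTable : List (List Int) :=
  [[2022, 9, 26], [2022, 10, 5], [2022, 10, 21], [2022, 11, 14], [2022, 11, 23], [2022, 11, 24],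
   [2022, 11, 25], [2022, 12, 19], [2022, 12, 20], [2022, 12, 21], [2022, 12, 22], [2022, 12, 23],
   [2022, 12, 26], [2022, 12, 27], [2022, 12, 28], [2022, 12, 29], [2022, 12, 30],
   [2023, 1, 2], [2023, 1, 16], [2023, 2, 17], [2023, 2, 20], [2023, 3, 17],
   [2023, 3, 24], [2023, 3, 27], [2023, 3, 28], [2023, 3, 29], [2023, 3, 30],
   [2023, 3, 31], [2023, 4, 7], [2023, 5, 1], [2023, 5, 29]]

def daysOff (year : Int) (month : Int) (day : Int) : Int :=
  (PySem.List.pyRange 0 (PySem.List.len daysOffTable) 1).foldl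
    (fun happyDays i =>
      let row := PySem.List.pyGetD daysOffTable i []
      if year > PySem.List.pyGetD row 0 0 then happyDays + 1
      else if year = PySem.List.pyGetD row 0 0 then
        if month > PySem.List.pyGetD row 1 0 then happyDays + 1
        else if month = PySem.List.pyGetD row 1 0 then
          if day > PySem.List.pyGetD row 2 0 then happyDays + 1
          else happyDays
        else happyDays
      else happyDays)
    0

-- ===== PORT B =====
-- the literal module constant _DATES of Source B ((year, month, day) tuples, chronological)
def datesB : List (Int × Int × Int) :=
  [(2022, 9, 26), (2022, 10, 5), (2022, 10, 21), (2022, 11, 14), (2022, 11, 23),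
   (2022, 11, 24), (2022, 11, 25), (2022, 12, 19), (2022, 12, 20), (2022, 12, 21),
   (2022, 12, 22), (2022, 12, 23), (2022, 12, 26), (2022, 12, 27), (2022, 12, 28),
   (2022, 12, 29), (2022, 12, 30), (2023, 1, 2), (2023, 1, 16), (2023, 2, 17),
   (2023, 2, 20), (2023, 3, 17), (2023, 3, 24), (2023, 3, 27), (2023, 3, 28),
   (2023, 3, 29), (2023, 3, 30), (2023, 3, 31), (2023, 4, 7), (2023, 5, 1),
   (2023, 5, 29)]

-- Source B's helper _before(entry, year, month, day)
def beforeB (e : Int × Int × Int) (year : Int) (month : Int) (day : Int) : Bool :=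
  if e.1 ≠ year then decide (e.1 < year)
  else if e.2.1 ≠ month then decide (e.2.1 < month)
  else decide (e.2.2 < day)

-- Source B's while loop (lo/hi binary search); indices stay in [0, len] so Nat division is exact
def bisectB (year : Int) (month : Int) (day : Int) (lo hi : Nat) : Nat :=
  if lo < hi then
    let mid := (lo + hi) / 2
    if beforeB (datesB.getD mid (0, 0, 0)) year month day then
      bisectB year month day (mid + 1) hi
    else
      bisectB year month day lo mid
  else lo
termination_by hi - lo
decreasing_by all_goals omega

def daysOff_alt (year : Int) (month : Int) (day : Int) : Int :=
  (bisectB year month day 0 datesB.length : Int)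

-- ===== PRECONDITION & SPEC =====
def Spec_daysOff (year : Int) (month : Int) (day : Int) (out : Int) : Prop := out = daysOff_alt year month day
instance (year : Int) (month : Int) (day : Int) (out : Int) : Decidable (Spec_daysOff year month day out) := by unfold Spec_daysOff; infer_instance

-- ===== CLAIM (what is proved, stated in full; the proofs are below) =====
def Claim_equal_daysOff : Prop := ∀ (year : Int) (month : Int) (day : Int), Dom_daysOff year month day → Spec_daysOff year month day (daysOff year month day)

-- ===== LEMMAS AND PROOFS =====

-- the predicate both programs count: entry strictly before the target date
def pB (year month day : Int) (e : Int × Int × Int) : Bool := beforeB e year month day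

def rowToTriple (r : List Int) : Int × Int × Int := (r.getD 0 0, r.getD 1 0, r.getD 2 0)

lemma datesB_eq_map : datesB = daysOffTable.map rowToTriple := by decide

-- A's fold equals counting pB over the table (via rowToTriple)
lemma daysOff_eq_countP (year month day : Int) :
    daysOff year month day = (daysOffTable.countP (pB year month day ∘ rowToTriple) : Int) := by
  unfold daysOff
  rw [PySem.List.foldl_pyRange_zero_pyGetD daysOffTable []
    (fun happyDays row =>
      if year > PySem.List.pyGetD row 0 0 then happyDays + 1
      else if year = PySem.List.pyGetD row 0 0 then
        if month > PySem.List.pyGetD row 1 0 then happyDays + 1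
        else if month = PySem.List.pyGetD row 1 0 then
          if day > PySem.List.pyGetD row 2 0 then happyDays + 1
          else happyDays
        else happyDays
      else happyDays) 0]
  have hfun : (fun (happyDays : Int) (row : List Int) =>
      if year > PySem.List.pyGetD row 0 0 then happyDays + 1
      else if year = PySem.List.pyGetD row 0 0 then
        if month > PySem.List.pyGetD row 1 0 then happyDays + 1
        else if month = PySem.List.pyGetD row 1 0 then
          if day > PySem.List.pyGetD row 2 0 then happyDays + 1
          else happyDays
        else happyDays
      else happyDays)
      = (fun acc row => if (pB year month day ∘ rowToTriple) row then acc + 1 else acc) := by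
    funext acc row
    simp only [pB, rowToTriple, beforeB, Function.comp,
      PySem.List.pyGetD_ofNat']
    split_ifs <;> simp_all <;> omega
  rw [hfun, PySem.List.foldl_count_if]
  simp

-- a strictly earlier entry is before any date the later entry is before
lemma before_trans (a b : Int × Int × Int) (y m d : Int)
    (hab : beforeB a b.1 b.2.1 b.2.2 = true) (hb : beforeB b y m d = true) :
    beforeB a y m d = true := by
  simp only [beforeB] at *
  split_ifs at * <;> simp_all <;> omega

-- pB is downward closed along datesB (the table is strictly increasing)
lemma pB_mono (y m d : Int) (i j : Nat) (hij : i ≤ j) (hj : j < datesB.length)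
    (h : pB y m d (datesB.getD j (0, 0, 0)) = true) :
    pB y m d (datesB.getD i (0, 0, 0)) = true := by
  rcases Nat.lt_or_ge i j with hlt | hge
  · have hpw : datesB.Pairwise (fun a b => beforeB a b.1 b.2.1 b.2.2 = true) := by decide
    have hi : i < datesB.length := Nat.lt_trans hlt hj
    have hab := (List.pairwise_iff_getElem).mp hpw i j hi hj hlt
    have e1 : datesB.getD i (0, 0, 0) = datesB[i] := List.getD_eq_getElem _ _ hi
    have e2 : datesB.getD j (0, 0, 0) = datesB[j] := List.getD_eq_getElem _ _ hj
    rw [e1]; rw [e2] at h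
    exact before_trans _ _ _ _ _ hab h
  · have : i = j := Nat.le_antisymm hij hge
    rw [this]; exact h

-- the binary search maintains: everything left of lo is before, everything from hi on is not
lemma bisectB_spec (y m d : Int) (lo hi : Nat) (hlohi : lo ≤ hi) (hhi : hi ≤ datesB.length)
    (hlow : ∀ i, i < lo → pB y m d (datesB.getD i (0, 0, 0)) = true)
    (hhigh : ∀ j, hi ≤ j → j < datesB.length → pB y m d (datesB.getD j (0, 0, 0)) = false) :
    lo ≤ bisectB y m d lo hi ∧ bisectB y m d lo hi ≤ hi ∧
    (∀ i, i < bisectB y m d lo hi → pB y m d (datesB.getD i (0, 0, 0)) = true) ∧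
    (∀ j, bisectB y m d lo hi ≤ j → j < datesB.length → pB y m d (datesB.getD j (0, 0, 0)) = false) := by
  induction lo, hi using bisectB.induct y m d with
  | case1 lo hi h mid hbef ih =>
    have hmid : mid = (lo + hi) / 2 := rfl
    rw [hmid] at hbef ih
    rw [bisectB]
    simp only [h, if_true]
    rw [if_pos hbef]
    obtain ⟨h1, h2, h3, h4⟩ := ih (by omega) hhi
      (fun i hi' => pB_mono y m d i ((lo + hi) / 2) (by omega) (by omega) hbef)
      hhigh
    exact ⟨by omega, h2, h3, h4⟩
  | case2 lo hi h mid hbef ih =>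
    have hmid : mid = (lo + hi) / 2 := rfl
    rw [hmid] at hbef ih
    rw [bisectB]
    simp only [h, if_true]
    rw [if_neg hbef]
    have hhigh' : ∀ j, (lo + hi) / 2 ≤ j → j < datesB.length →
        pB y m d (datesB.getD j (0, 0, 0)) = false := by
      intro j hj hjlen
      by_contra hc
      have hc' : pB y m d (datesB.getD j (0, 0, 0)) = true := by
        cases hpv : pB y m d (datesB.getD j (0, 0, 0)) <;> simp_all
      have := pB_mono y m d ((lo + hi) / 2) j hj hjlen hc'
      simp only [pB] at this
      exact hbef this
    obtain ⟨h1, h2, h3, h4⟩ := ih (by omega) (by omega) hlow hhigh'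
    exact ⟨h1, by omega, h3, h4⟩
  | case3 lo hi h =>
    rw [bisectB, if_neg h]
    refine ⟨Nat.le_refl _, hlohi, hlow, ?_⟩
    intro j hj hjl
    exact hhigh j (by omega) hjl

-- counting a prefix-true / suffix-false predicate
lemma countP_of_prefix (p : (Int × Int × Int) → Bool) (l : List (Int × Int × Int)) (k : Nat)
    (hk : k ≤ l.length)
    (ht : ∀ i, i < k → p (l.getD i (0, 0, 0)) = true)
    (hf : ∀ j, k ≤ j → j < l.length → p (l.getD j (0, 0, 0)) = false) :
    l.countP p = k := by
  have hsplit : l = l.take k ++ l.drop k := (List.take_append_drop k l).symm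
  rw [hsplit, List.countP_append]
  have h1 : (l.take k).countP p = (l.take k).length := by
    rw [List.countP_eq_length]
    intro a ha
    obtain ⟨i, hi, hget⟩ := List.mem_iff_getElem.mp ha
    have hilen : i < l.length := by
      have := hi; rw [List.length_take] at this; omega
    have hik : i < k := by
      have := hi; rw [List.length_take] at this; omega
    have : a = l[i] := by
      rw [← hget, List.getElem_take]
    rw [this, ← List.getD_eq_getElem l (0,0,0) hilen]
    exact ht i hik
  have h2 : (l.drop k).countP p = 0 := by
    rw [List.countP_eq_zero]
    intro a ha
    obtain ⟨i, hi, hget⟩ := List.mem_iff_getElem.mp ha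
    have hilen : k + i < l.length := by
      have := hi; rw [List.length_drop] at this; omega
    have : a = l[k + i] := by
      rw [← hget, List.getElem_drop]
    rw [this]
    have hfv := hf (k + i) (by omega) hilen
    rw [List.getD_eq_getElem l (0,0,0) hilen] at hfv
    simp [hfv]
  rw [h1, h2, List.length_take]
  omega

lemma alt_eq_countP (year month day : Int) :
    daysOff_alt year month day = (datesB.countP (pB year month day) : Int) := by
  unfold daysOff_alt
  have h := bisectB_spec year month day 0 datesB.length (Nat.zero_le _) (Nat.le_refl _)
    (fun i hi => absurd hi (Nat.not_lt_zero i))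
    (fun j hj hjlen => absurd hjlen (by omega))
  have := countP_of_prefix (pB year month day) datesB (bisectB year month day 0 datesB.length)
    h.2.1 h.2.2.1 h.2.2.2
  rw [this]

-- ===== VERDICT (by name: the statement is the Claim_ definition above) =====
theorem daysOff_spec : Claim_equal_daysOff := by
  intro year month day _
  unfold Spec_daysOff
  rw [daysOff_eq_countP, alt_eq_countP, datesB_eq_map, List.countP_map]
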